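-- pv_equiv track=rewrite | github.com/gulnaz1024/Gulnaz_Ansari_Halah | number_groups.py | sumOfGroup
-- ===== SOURCE A (Python) =====
-- def sumOfGroup(k):
--
--     firstEl = int((k * (k - 1)) + 1)
--     sum = 0
--
--     while k:
--         sum += firstEl
--         firstEl += 2
--         k=k-1
--
--     return sum
-- ===== SOURCE B (Python) =====
-- def sumOfGroup(k):
--     # Closed form: sum of k consecutive odds starting at k*(k-1)+1 is k**3.
--     return k ** 3
-- ===== Notes on version B (the rewrite author's own statement) =====
-- stated objective: faster
-- what changed: Replaces the O(k) accumulation loop over k consecutive odd numbers with the closed-form k**3.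
-- outside the precondition, e.g. on sumOfGroup(-1): A does not finish within the time limit, B returns -1
import Mathlib
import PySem

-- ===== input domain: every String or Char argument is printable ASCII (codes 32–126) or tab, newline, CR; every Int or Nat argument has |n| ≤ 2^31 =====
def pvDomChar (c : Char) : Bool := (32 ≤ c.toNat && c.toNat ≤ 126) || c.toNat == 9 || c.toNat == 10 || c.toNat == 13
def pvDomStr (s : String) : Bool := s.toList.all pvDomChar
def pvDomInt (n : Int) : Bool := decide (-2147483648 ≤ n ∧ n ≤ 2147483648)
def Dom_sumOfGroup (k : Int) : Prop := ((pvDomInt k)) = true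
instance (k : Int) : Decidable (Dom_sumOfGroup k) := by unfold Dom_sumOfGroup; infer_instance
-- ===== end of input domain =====

-- B replaces A's O(k) summation loop with the closed form k**3 (asymptotically faster).

-- ===== PORT A =====
-- 'while k: sum += firstEl; firstEl += 2; k = k - 1' — the loop decrements k to 0;
-- transliterated as structural recursion on k.toNat (valid on Pre_: 0 ≤ k).
def sumOfGroupLoop : Nat → Int → Int → Int
  | 0, _, sum => sum
  | n + 1, firstEl, sum => sumOfGroupLoop n (firstEl + 2) (sum + firstEl)

def sumOfGroup (k : Int) : Int :=
  sumOfGroupLoop k.toNat (k * (k - 1) + 1) 0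

-- ===== PORT B =====
def sumOfGroup_alt (k : Int) : Int := k ^ 3

-- ===== PRECONDITION & SPEC =====
-- Pre_ excludes k < 0, where A's 'while k' loop never terminates (Python diverges); B returns k**3 there.
def Pre_sumOfGroup (k : Int) : Prop := 0 ≤ k
instance (k : Int) : Decidable (Pre_sumOfGroup k) := by unfold Pre_sumOfGroup; infer_instance
def pvWitness_sumOfGroup : Int := (4)
def Spec_sumOfGroup (k : Int) (out : Int) : Prop := out = sumOfGroup_alt k
instance (k : Int) (out : Int) : Decidable (Spec_sumOfGroup k out) := by unfold Spec_sumOfGroup; infer_instance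

-- ===== CLAIM (what is proved, stated in full; the proofs are below) =====
def Claim_equal_sumOfGroup : Prop := ∀ (k : Int), Dom_sumOfGroup k → Pre_sumOfGroup k → Spec_sumOfGroup k (sumOfGroup k)

-- ===== LEMMAS AND PROOFS =====

theorem sumOfGroupLoop_eq (n : Nat) : ∀ (f s : Int),
    sumOfGroupLoop n f s = s + n * f + n * (n - 1) := by
  induction n with
  | zero => intro f s; simp [sumOfGroupLoop]
  | succ m ih =>
    intro f s
    rw [sumOfGroupLoop, ih]
    push_cast
    ring

-- ===== VERDICT (by name: the statement is the Claim_ definition above) =====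
theorem sumOfGroup_spec : Claim_equal_sumOfGroup := by
  intro k _ hk
  unfold Spec_sumOfGroup sumOfGroup sumOfGroup_alt
  rw [sumOfGroupLoop_eq]
  rw [Int.toNat_of_nonneg hk]
  ring
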